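-- pv_equiv track=rewrite | github.com/ricekot/learning | advent-of-code-2025/day06/solution.py | part1
-- ===== SOURCE A (Python) =====
-- def part1(input: list[str]) -> int:
--     operators: list[str] = []
--     operands: list[list[int]] = []
--     for line in input:
--         line = line.strip()
--         if "*" in line or "+" in line:
--             operators = line.split()
--         else:
--             operands.append(list(map(lambda x: int(x), line.split())))
--     result = 0
--     for i, operator in enumerate(operators):
--         problem_result = 0 if operator == "+" else 1
--         for j in range(len(operands)):
--             if operator == "+":
--                 problem_result += operands[j][i]
--             else:
--                 problem_result *= operands[j][i]
--         result += problem_result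
--     return result
-- ===== SOURCE B (Python) =====
-- def part1(input: list[str]) -> int:
--     stripped = [line.strip() for line in input]
--     operators: list[str] = []
--     for line in stripped:
--         if "*" in line or "+" in line:
--             operators = line.split()
--     operands = [[int(x) for x in line.split()]
--                 for line in stripped if not ("*" in line or "+" in line)]
--     accum = [0 if op == "+" else 1 for op in operators]
--     for row in operands:
--         accum = [a + row[i] if op == "+" else a * row[i]
--                  for i, (op, a) in enumerate(zip(operators, accum))]
--     return sum(accum)
-- ===== Notes on version B (the rewrite author's own statement) =====
-- stated objective: alternative
-- what changed: B parses via comprehensions/filter instead of a stateful pair-accumulating loop, and inverts the aggregation loop nesting: one row-major pass maintains a vector of per-column partial results (rebuilt per row) instead of finishing each column's scalar in its own inner pass, then sums the vector.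
import Mathlib
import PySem

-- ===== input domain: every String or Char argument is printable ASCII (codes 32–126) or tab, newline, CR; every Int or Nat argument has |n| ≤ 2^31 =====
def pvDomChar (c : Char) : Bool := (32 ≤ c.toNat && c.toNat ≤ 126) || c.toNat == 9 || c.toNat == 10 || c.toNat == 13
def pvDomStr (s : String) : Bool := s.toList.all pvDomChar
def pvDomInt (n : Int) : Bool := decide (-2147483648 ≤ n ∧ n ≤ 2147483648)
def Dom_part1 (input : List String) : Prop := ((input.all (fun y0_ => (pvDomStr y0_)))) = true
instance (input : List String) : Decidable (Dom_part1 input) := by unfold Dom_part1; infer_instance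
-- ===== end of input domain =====

-- B replaces A's per-column inner scans by one row-major pass over a vector of per-column
-- partial results and parses via comprehensions; an alternative decomposition, same cost.

-- ===== PORT A =====
def part1 (input : List String) : Int :=
  let ps := input.foldl (fun (st : List String × List (List Int)) line =>
      let line := PySem.Str.strip line
      if PySem.Str.isIn "*" line || PySem.Str.isIn "+" line then
        (PySem.Str.split₀ line, st.2)
      else
        (st.1, st.2 ++ [(PySem.Str.split₀ line).map (fun x => (PySem.Int.ofStr? x).getD 0)]))
    ([], [])
  let operators := ps.1
  let operands := ps.2
  (PySem.List.enumerate operators 0).foldl (fun result iop =>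
    let operator := iop.2
    let problem_result : Int :=
      (PySem.List.pyRange 0 (operands.length : Int) 1).foldl (fun pr j =>
        let row := PySem.List.pyGetD operands j []
        if operator = "+" then pr + PySem.List.pyGetD row iop.1 0
        else pr * PySem.List.pyGetD row iop.1 0)
        (if operator = "+" then 0 else 1)
    result + problem_result) 0

-- ===== PORT B =====
def part1_alt (input : List String) : Int :=
  let stripped := input.map PySem.Str.strip
  let operators := stripped.foldl (fun ops line =>
      if PySem.Str.isIn "*" line || PySem.Str.isIn "+" line then PySem.Str.split₀ line else ops) []
  let operands := (stripped.filter
      (fun line => !(PySem.Str.isIn "*" line || PySem.Str.isIn "+" line))).map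
      (fun line => (PySem.Str.split₀ line).map (fun x => (PySem.Int.ofStr? x).getD 0))
  let accum := operators.map (fun op => if op = "+" then (0 : Int) else 1)
  let accum := operands.foldl (fun acc row =>
      (PySem.List.enumerate (operators.zip acc) 0).map (fun p =>
        if p.2.1 = "+" then p.2.2 + PySem.List.pyGetD row p.1 0
        else p.2.2 * PySem.List.pyGetD row p.1 0)) accum
  accum.sum

-- ===== PRECONDITION & SPEC =====
-- Pre_ excludes exactly the inputs where Python A raises: a non-operator line with a token
-- int() rejects (ValueError), or an operand row shorter than the operator list (IndexError).
def Pre_part1 (input : List String) : Prop :=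
  let stripped := input.map PySem.Str.strip
  let isOp := fun (l : String) => PySem.Str.isIn "*" l || PySem.Str.isIn "+" l
  let ops := ((stripped.filter isOp).getLast?.map PySem.Str.split₀).getD []
  ∀ l ∈ stripped, isOp l = false →
    (∀ t ∈ PySem.Str.split₀ l, (PySem.Int.ofStr? t).isSome) ∧
    ops.length ≤ (PySem.Str.split₀ l).length
instance (input : List String) : Decidable (Pre_part1 input) := by unfold Pre_part1; infer_instance
def pvWitness_part1 : List String := ["+ *", "2 3", "4 5"]

def Spec_part1 (input : List String) (out : Int) : Prop := out = part1_alt input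
instance (input : List String) (out : Int) : Decidable (Spec_part1 input out) := by unfold Spec_part1; infer_instance

-- ===== CLAIM (what is proved, stated in full; the proofs are below) =====
def Claim_equal_part1 : Prop := ∀ (input : List String), Dom_part1 input → Pre_part1 input → Spec_part1 input (part1 input)

-- ===== LEMMAS AND PROOFS =====

-- A's stateful parsing loop computes B's (foldl-operators, filter+map-operands) pair.
theorem pv_parse_fold (input : List String) :
    ∀ (o : List String) (r : List (List Int)),
    input.foldl (fun (st : List String × List (List Int)) line =>
        let line := PySem.Str.strip line
        if PySem.Str.isIn "*" line || PySem.Str.isIn "+" line then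
          (PySem.Str.split₀ line, st.2)
        else
          (st.1, st.2 ++ [(PySem.Str.split₀ line).map (fun x => (PySem.Int.ofStr? x).getD 0)])) (o, r)
    = ((input.map PySem.Str.strip).foldl (fun ops line =>
        if PySem.Str.isIn "*" line || PySem.Str.isIn "+" line then PySem.Str.split₀ line else ops) o,
       r ++ ((input.map PySem.Str.strip).filter
        (fun line => !(PySem.Str.isIn "*" line || PySem.Str.isIn "+" line))).map
        (fun line => (PySem.Str.split₀ line).map (fun x => (PySem.Int.ofStr? x).getD 0))) := by
  induction input with
  | nil => intro o r; simp
  | cons a t ih =>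
    intro o r
    simp only [List.foldl_cons, List.map_cons, List.filter_cons]
    by_cases h : (PySem.Str.isIn "*" (PySem.Str.strip a) || PySem.Str.isIn "+" (PySem.Str.strip a)) = true
    · simp only [h, if_true, Bool.not_true, Bool.false_eq_true, if_false, ih]
    · simp only [Bool.not_eq_true] at h
      simp only [h, Bool.false_eq_true, if_false, Bool.not_false, if_true, ih, List.map_cons,
        List.append_assoc, List.singleton_append]

-- enumerating ops zipped with an accumulator indexed like ops
theorem pv_enum_zip_map {β : Type} (g : Int × String → β) (ops : List String) :
    ∀ (s : Int),
    PySem.List.enumerate (ops.zip ((PySem.List.enumerate ops s).map g)) s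
    = (PySem.List.enumerate ops s).map (fun p => (p.1, (p.2, g p))) := by
  induction ops with
  | nil => intro s; simp [PySem.List.enumerate_nil]
  | cons a t ih =>
    intro s
    simp [PySem.List.enumerate_cons, ih (s + 1)]

-- the row-major vector pass computes, at each column, the per-column fold
theorem pv_rows_fold (ops : List String) (rows : List (List Int)) :
    ∀ (g : Int × String → Int),
    rows.foldl (fun acc row => (PySem.List.enumerate (ops.zip acc) 0).map (fun p =>
        if p.2.1 = "+" then p.2.2 + PySem.List.pyGetD row p.1 0
        else p.2.2 * PySem.List.pyGetD row p.1 0)) ((PySem.List.enumerate ops 0).map g)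
    = (PySem.List.enumerate ops 0).map (fun p =>
        rows.foldl (fun pr row => if p.2 = "+" then pr + PySem.List.pyGetD row p.1 0
          else pr * PySem.List.pyGetD row p.1 0) (g p)) := by
  induction rows with
  | nil => intro g; simp
  | cons row rest ih =>
    intro g
    have hstep : ((PySem.List.enumerate (ops.zip ((PySem.List.enumerate ops 0).map g)) 0).map (fun p =>
        if p.2.1 = "+" then p.2.2 + PySem.List.pyGetD row p.1 0
        else p.2.2 * PySem.List.pyGetD row p.1 0))
        = (PySem.List.enumerate ops 0).map (fun p =>
            if p.2 = "+" then g p + PySem.List.pyGetD row p.1 0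
            else g p * PySem.List.pyGetD row p.1 0) := by
      rw [pv_enum_zip_map g ops 0, List.map_map]
      rfl
    simp only [List.foldl_cons, hstep,
      ih (fun p => if p.2 = "+" then g p + PySem.List.pyGetD row p.1 0
                   else g p * PySem.List.pyGetD row p.1 0)]

-- both aggregations compute the sum over columns of the per-column fold
theorem pv_core (ops : List String) (rows : List (List Int)) :
    (PySem.List.enumerate ops 0).foldl (fun result iop =>
      result + (PySem.List.pyRange 0 (rows.length : Int) 1).foldl (fun pr j =>
          let row := PySem.List.pyGetD rows j []
          if iop.2 = "+" then pr + PySem.List.pyGetD row iop.1 0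
          else pr * PySem.List.pyGetD row iop.1 0)
        (if iop.2 = "+" then 0 else 1)) 0
    = (rows.foldl (fun acc row =>
        (PySem.List.enumerate (ops.zip acc) 0).map (fun p =>
          if p.2.1 = "+" then p.2.2 + PySem.List.pyGetD row p.1 0
          else p.2.2 * PySem.List.pyGetD row p.1 0))
        (ops.map (fun op => if op = "+" then (0 : Int) else 1))).sum := by
  have hinit : (ops.map (fun op => if op = "+" then (0 : Int) else 1))
      = (PySem.List.enumerate ops 0).map (fun p => if p.2 = "+" then (0 : Int) else 1) := by
    rw [show (fun p : Int × String => if p.2 = "+" then (0 : Int) else 1)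
        = ((fun op => if op = "+" then (0 : Int) else 1) ∘ Prod.snd) from rfl,
      ← List.map_map, PySem.List.map_snd_enumerate]
  rw [PySem.List.foldl_add, hinit,
    pv_rows_fold ops rows (fun p => if p.2 = "+" then (0 : Int) else 1), zero_add]
  congr 1
  apply List.map_congr_left
  intro p _
  exact PySem.List.foldl_pyRange_zero_pyGetD' rows []
    (fun pr row => if p.2 = "+" then pr + PySem.List.pyGetD row p.1 0
      else pr * PySem.List.pyGetD row p.1 0) _

-- ===== VERDICT (by name: the statement is the Claim_ definition above) =====
theorem part1_spec : Claim_equal_part1 := by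
  unfold Claim_equal_part1
  intro input _ _
  unfold Spec_part1 part1 part1_alt
  rw [pv_parse_fold input [] []]
  exact pv_core
    ((input.map PySem.Str.strip).foldl (fun ops line =>
      if PySem.Str.isIn "*" line || PySem.Str.isIn "+" line then PySem.Str.split₀ line else ops) [])
    (((input.map PySem.Str.strip).filter
      (fun line => !(PySem.Str.isIn "*" line || PySem.Str.isIn "+" line))).map
      (fun line => (PySem.Str.split₀ line).map (fun x => (PySem.Int.ofStr? x).getD 0)))
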